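-- pv_equiv track=rewrite | github.com/arxxv/6Companies30Days | M4/7. Pots of Gold.py | findMaxCoins
-- ===== SOURCE A (Python) =====
-- def findMaxCoins(nums):
--     n = len(nums)
--     if n <= 2: return max(nums)
--     dp = [[0 for x in range(n)] for y in range(n)]
--
--     def get(dp, i, j):
--         return dp[i][j] if i <= j else 0
--
--     for k in range(n):
--         i = 0
--         j = k
--         while j < n:
--             start = nums[i] + min(get(dp, i + 2, j), get(dp, i + 1, j - 1))
--             end = nums[j] + min(get(dp, i + 1, j - 1), get(dp, i, j - 2))
--             dp[i][j] = max(start, end)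
--             i = i + 1
--             j = j + 1
--
--     return dp[0][n - 1]
-- ===== SOURCE B (Python) =====
-- def findMaxCoins(nums):
--     # Top-down: memoized recursion on the interval [i, j] (demand-driven, no table
--     # is built up front; only reachable intervals are ever computed).
--     n = len(nums)
--     if n <= 2:
--         return max(nums)
--     memo = {}
--
--     def solve(i, j):
--         if j < i:
--             return 0
--         if (i, j) in memo:
--             return memo[(i, j)]
--         if i == j:
--             v = nums[i]
--         else:
--             a = solve(i + 1, j - 1)
--             v = max(nums[i] + min(solve(i + 2, j), a),
--                     nums[j] + min(a, solve(i, j - 2)))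
--         memo[(i, j)] = v
--         return v
--
--     return solve(0, n - 1)
-- ===== Notes on version B (the rewrite author's own statement) =====
-- stated objective: alternative
-- what changed: Replaces the bottom-up diagonal-by-diagonal fill of an n-by-n table (with a bounds-checking get() helper) by a top-down memoized recursion solve(i,j) on intervals with a memo dict, computing only demanded subintervals.
import Mathlib
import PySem

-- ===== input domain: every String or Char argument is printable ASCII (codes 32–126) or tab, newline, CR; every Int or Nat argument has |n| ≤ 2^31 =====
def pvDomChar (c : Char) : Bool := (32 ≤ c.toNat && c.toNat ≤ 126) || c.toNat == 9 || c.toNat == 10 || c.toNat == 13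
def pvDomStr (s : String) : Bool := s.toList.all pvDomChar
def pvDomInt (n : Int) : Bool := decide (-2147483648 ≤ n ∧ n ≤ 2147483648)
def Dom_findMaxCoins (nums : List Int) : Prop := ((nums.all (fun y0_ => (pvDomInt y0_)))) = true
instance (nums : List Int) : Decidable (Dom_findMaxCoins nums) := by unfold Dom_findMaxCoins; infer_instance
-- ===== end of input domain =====

-- B replaces A's bottom-up diagonal fill of an n×n table by a top-down memoized
-- recursion solve(i, j) over intervals with a memo dict (alternative decomposition,
-- same asymptotic cost); return values agree on every non-empty list.

-- ===== PORT A =====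
-- dp[i][j]; every reachable access is in range, so the `.getD 0` default is never used
def pvGet2 (dp : List (List Int)) (i j : Int) : Int :=
  ((PySem.List.pyGet? dp i).bind fun r => PySem.List.pyGet? r j).getD 0

-- the helper `get(dp, i, j)`
def pvGetA (dp : List (List Int)) (i j : Int) : Int :=
  if i ≤ j then pvGet2 dp i j else 0

-- `dp[i][j] = v`; reachable i, j are always in range
def pvSetA (dp : List (List Int)) (i j : Int) (v : Int) : List (List Int) :=
  PySem.List.pySetD dp i (PySem.List.pySetD (PySem.List.pyGetD dp i []) j v)

-- the `while j < n` loop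
def pvInnerA (nums : List Int) (n : Int) (i j : Int) (dp : List (List Int)) :
    List (List Int) :=
  if _h : j < n then
    let start := PySem.List.pyGetD nums i 0 +
      min (pvGetA dp (i + 2) j) (pvGetA dp (i + 1) (j - 1))
    let endv := PySem.List.pyGetD nums j 0 +
      min (pvGetA dp (i + 1) (j - 1)) (pvGetA dp i (j - 2))
    pvInnerA nums n (i + 1) (j + 1) (pvSetA dp i j (max start endv))
  else dp
termination_by (n - j).toNat
decreasing_by omega

def findMaxCoins (nums : List Int) : Int :=
  let n : Int := nums.length
  if n ≤ 2 then (PySem.List.max? nums (fun y => y)).getD 0  -- max(nums); raises on [] (outside Pre_)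
  else
    let dp0 : List (List Int) := List.replicate n.toNat (List.replicate n.toNat 0)
    let dp := (PySem.List.pyRange 0 n 1).foldl (fun dp k => pvInnerA nums n 0 k dp) dp0
    pvGet2 dp 0 (n - 1)

-- ===== PORT B =====
-- the inner `def solve(i, j)` of Source B, with the memo dict threaded through;
-- every reachable nums[i]/nums[j] access is in range, so `.getD 0` is never used
def pvSolveB (nums : List Int) (i j : Int) (memo : PySem.Dict (Int × Int) Int) :
    Int × PySem.Dict (Int × Int) Int :=
  if _h : j < i then (0, memo)
  else if memo.contains (i, j) then
    (memo.getD (i, j) 0, memo)  -- memo[(i, j)]: the key is present, so the default is never used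
  else
      if i = j then
        let v := PySem.List.pyGetD nums i 0
        (v, memo.insert (i, j) v)
      else
        let r1 := pvSolveB nums (i + 1) (j - 1) memo
        let r2 := pvSolveB nums (i + 2) j r1.2
        let r3 := pvSolveB nums i (j - 2) r2.2
        let v := max (PySem.List.pyGetD nums i 0 + min r2.1 r1.1)
                     (PySem.List.pyGetD nums j 0 + min r1.1 r3.1)
        (v, r3.2.insert (i, j) v)
termination_by (j + 1 - i).toNat
decreasing_by all_goals omega

def findMaxCoins_alt (nums : List Int) : Int :=
  let n : Int := nums.length
  if n ≤ 2 then (PySem.List.max? nums (fun y => y)).getD 0  -- max(nums); raises on [] (outside Pre_)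
  else (pvSolveB nums 0 (n - 1) PySem.Dict.empty).1

-- ===== PRECONDITION & SPEC =====
-- Pre_ excludes only the empty list, on which A raises ValueError (max of empty sequence).
def Pre_findMaxCoins (nums : List Int) : Prop := nums ≠ []
instance (nums : List Int) : Decidable (Pre_findMaxCoins nums) := by
  unfold Pre_findMaxCoins; infer_instance

def pvWitness_findMaxCoins : List Int := [4, 6, 2, 3]

def Spec_findMaxCoins (nums : List Int) (out : Int) : Prop := out = findMaxCoins_alt nums
instance (nums : List Int) (out : Int) : Decidable (Spec_findMaxCoins nums out) := by
  unfold Spec_findMaxCoins; infer_instance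

-- ===== CLAIM (what is proved, stated in full; the proofs are below) =====
def Claim_equal_findMaxCoins : Prop := ∀ (nums : List Int), Dom_findMaxCoins nums →
  Pre_findMaxCoins nums → Spec_findMaxCoins nums (findMaxCoins nums)

-- ===== LEMMAS AND PROOFS =====

-- the value of the game on the interval [i, j] (0 on empty/invalid intervals)
def fSpec (nums : List Int) (i j : Int) : Int :=
  if j < i then 0
  else if i = j then PySem.List.pyGetD nums i 0
  else
    max (PySem.List.pyGetD nums i 0 +
          min (fSpec nums (i + 2) j) (fSpec nums (i + 1) (j - 1)))
        (PySem.List.pyGetD nums j 0 +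
          min (fSpec nums (i + 1) (j - 1)) (fSpec nums i (j - 2)))
termination_by (j + 1 - i).toNat
decreasing_by all_goals omega

lemma fSpec_neg (nums : List Int) {i j : Int} (h : j < i) : fSpec nums i j = 0 := by
  rw [fSpec]; simp [h]

lemma fSpec_diag (nums : List Int) (i : Int) : fSpec nums i i = PySem.List.pyGetD nums i 0 := by
  rw [fSpec]; simp

lemma fSpec_rec (nums : List Int) {i j : Int} (h : i ≤ j) :
    fSpec nums i j =
      max (PySem.List.pyGetD nums i 0 +
            min (fSpec nums (i + 2) j) (fSpec nums (i + 1) (j - 1)))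
          (PySem.List.pyGetD nums j 0 +
            min (fSpec nums (i + 1) (j - 1)) (fSpec nums i (j - 2))) := by
  rcases eq_or_lt_of_le h with rfl | hlt
  · rw [fSpec]
    simp [fSpec_neg nums (show i - 2 < i by omega),
          fSpec_neg nums (show (i : Int) < i + 2 by omega),
          fSpec_neg nums (show (i : Int) - 1 < i + 1 by omega)]
  · rw [fSpec, if_neg (not_lt.mpr h), if_neg (by omega : ¬ i = j)]

-- max(nums) agrees with the game value for one- and two-element lists
lemma max?_eq_fSpec (nums : List Int) (h : nums ≠ []) (h2 : (nums.length : Int) ≤ 2) :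
    (PySem.List.max? nums (fun y => y)).getD 0 = fSpec nums 0 ((nums.length : Int) - 1) := by
  match nums, h with
  | [a], _ =>
      rw [PySem.List.max?_id_cons]
      norm_num
      rw [fSpec]
      norm_num [PySem.List.pyGetD_zero_cons]
  | [a, b], _ =>
      rw [PySem.List.max?_id_cons]
      norm_num
      rw [fSpec_rec [a, b] (by norm_num : (0 : Int) ≤ 1)]
      norm_num
      rw [fSpec_neg [a, b] (show (1 : Int) < 2 by norm_num),
          fSpec_neg [a, b] (show (0 : Int) < 1 by norm_num),
          fSpec_neg [a, b] (show (-1 : Int) < 0 by norm_num)]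
      simp [PySem.List.pyGetD, PySem.List.pyGet?, PySem.List.pyIdx?]
  | a :: b :: c :: rest, _ => simp at h2; omega

-- ---------- B side ----------

-- the memo invariant: every stored entry is the true game value of its interval
def MemoOK (nums : List Int) (memo : PySem.Dict (Int × Int) Int) : Prop :=
  ∀ p v, memo.get? p = some v → v = fSpec nums p.1 p.2

lemma solveB_spec (nums : List Int) (i j : Int) (memo : PySem.Dict (Int × Int) Int)
    (hm : MemoOK nums memo) :
    (pvSolveB nums i j memo).1 = fSpec nums i j ∧ MemoOK nums (pvSolveB nums i j memo).2 := by
  rw [pvSolveB]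
  split
  · rename_i hlt
    exact ⟨(fSpec_neg nums hlt).symm, hm⟩
  · rename_i hge
    split
    · rename_i hc
      cases hsome : memo.get? (i, j) with
      | none =>
          rw [PySem.Dict.contains_eq_isSome_get?, hsome] at hc
          simp at hc
      | some v =>
          refine ⟨?_, hm⟩
          rw [PySem.Dict.getD_eq_get?_getD, hsome]
          exact hm (i, j) v hsome
    · rename_i hc
      have hij : i ≤ j := by omega
      split
      · rename_i heq
        subst heq
        refine ⟨(fSpec_diag nums i).symm, ?_⟩
        intro p v hv
        rw [PySem.Dict.get?_insert] at hv
        split at hv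
        · rename_i hp; cases hv; rw [hp]; exact (fSpec_diag nums i).symm
        · exact hm p v hv
      · rename_i hne
        obtain ⟨e1, m1ok⟩ := solveB_spec nums (i + 1) (j - 1) memo hm
        obtain ⟨e2, m2ok⟩ := solveB_spec nums (i + 2) j _ m1ok
        obtain ⟨e3, m3ok⟩ := solveB_spec nums i (j - 2) _ m2ok
        simp only [e1, e2, e3]
        refine ⟨(fSpec_rec nums hij).symm, ?_⟩
        intro p v hv
        rw [PySem.Dict.get?_insert] at hv
        split at hv
        · rename_i hp; cases hv; rw [hp]; exact (fSpec_rec nums hij).symm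
        · exact m3ok p v hv
termination_by (j + 1 - i).toNat
decreasing_by all_goals omega

lemma alt_eq_fSpec (nums : List Int) (h : nums ≠ []) :
    findMaxCoins_alt nums = fSpec nums 0 ((nums.length : Int) - 1) := by
  unfold findMaxCoins_alt
  by_cases h2 : (nums.length : Int) ≤ 2
  · rw [if_pos h2]; exact max?_eq_fSpec nums h h2
  · rw [if_neg h2]
    exact (solveB_spec nums 0 ((nums.length : Int) - 1) PySem.Dict.empty
      (by intro p v hv; rw [PySem.Dict.get?_empty] at hv; cases hv)).1

-- ---------- A side ----------

def dpAt (dp : List (List Int)) (a b : ℕ) : Int := (dp.getD a []).getD b 0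

-- invariant of A's table: diagonals < k are done, and on diagonal k the columns < col
def GoodA (nums : List Int) (n k col : ℕ) (dp : List (List Int)) : Prop :=
  dp.length = n ∧ (∀ r ∈ dp, r.length = n) ∧
  ∀ a b : ℕ, a < n → b < n →
    dpAt dp a b =
      if a ≤ b ∧ (b - a < k ∨ (b - a = k ∧ b < col)) then fSpec nums ↑a ↑b else 0

lemma pvGet2_nat (dp : List (List Int)) (a b : ℕ)
    (ha : a < dp.length) (_hb : b < (dp.getD a []).length) :
    pvGet2 dp ↑a ↑b = dpAt dp a b := by
  unfold pvGet2 dpAt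
  rw [PySem.List.pyGet?_natCast, List.getElem?_eq_getElem ha]
  simp only [Option.bind_some, PySem.List.pyGet?_natCast]
  rw [List.getD_eq_getElem?_getD, List.getD_eq_getElem?_getD, List.getElem?_eq_getElem ha]
  simp

lemma rowlen_of_GoodA {nums : List Int} {n k col : ℕ} {dp : List (List Int)}
    (G : GoodA nums n k col dp) {a : ℕ} (ha : a < n) :
    (dp.getD a []).length = n := by
  obtain ⟨h1, h2, _⟩ := G
  have ha' : a < dp.length := by omega
  rw [List.getD_eq_getElem?_getD, List.getElem?_eq_getElem ha']
  exact h2 _ (List.getElem_mem ha')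

-- reading any cell whose diagonal distance is < k through A's get() helper
lemma getA_done {nums : List Int} {n k col : ℕ} {dp : List (List Int)}
    (G : GoodA nums n k col dp) (a b : Int)
    (h0 : 0 ≤ a) (hbn : b < (n : Int)) (hdist : b - a < (k : Int)) :
    pvGetA dp a b = fSpec nums a b := by
  unfold pvGetA
  by_cases hab : a ≤ b
  · have h0b : 0 ≤ b := le_trans h0 hab
    have han : a.toNat < dp.length := by rw [G.1]; omega
    have hrow : (dp.getD a.toNat []).length = n := rowlen_of_GoodA G (by omega)
    rw [if_pos hab, show a = ((a.toNat : ℕ) : Int) from (Int.toNat_of_nonneg h0).symm,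
        show b = ((b.toNat : ℕ) : Int) from (Int.toNat_of_nonneg h0b).symm,
        pvGet2_nat dp a.toNat b.toNat han (by rw [hrow]; omega),
        G.2.2 a.toNat b.toNat (by omega) (by omega),
        if_pos ⟨by omega, Or.inl (by omega)⟩]
  · rw [if_neg hab, fSpec_neg nums (by omega)]

lemma getD_set_eq_if {α : Type*} (l : List α) (i : ℕ) (v d : α) (b : ℕ) (hi : i < l.length) :
    (l.set i v).getD b d = if b = i then v else l.getD b d := by
  simp only [List.getD_eq_getElem?_getD, List.getElem?_set]
  by_cases h : b = i
  · subst h; simp [hi]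
  · rw [if_neg (fun he => h he.symm), if_neg h]

lemma GoodA_set {nums : List Int} {n k i j : ℕ} {dp : List (List Int)}
    (G : GoodA nums n k j dp) (hj : j < n) (hij : j = i + k) :
    GoodA nums n k (j + 1) (pvSetA dp ↑i ↑j (fSpec nums ↑i ↑j)) := by
  have hi : i < n := by omega
  have hrl : (dp.getD i []).length = n := rowlen_of_GoodA G hi
  have hdp : pvSetA dp ↑i ↑j (fSpec nums ↑i ↑j) =
      dp.set i ((dp.getD i []).set j (fSpec nums ↑i ↑j)) := by
    unfold pvSetA
    rw [PySem.List.pyGetD_natCast, PySem.List.pySetD_natCast, PySem.List.pySetD_natCast]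
  rw [hdp]
  obtain ⟨h1, h2, h3⟩ := G
  refine ⟨by simp [h1], ?_, ?_⟩
  · intro r hr
    rcases List.mem_or_eq_of_mem_set hr with hr' | hre
    · exact h2 r hr'
    · rw [hre, List.length_set, hrl]
  · intro a b han hbn
    have hdpa : dpAt (dp.set i ((dp.getD i []).set j (fSpec nums ↑i ↑j))) a b =
        if a = i ∧ b = j then fSpec nums ↑i ↑j else dpAt dp a b := by
      unfold dpAt
      rw [getD_set_eq_if dp i _ [] a (by omega)]
      by_cases hai : a = i
      · subst hai
        rw [if_pos rfl, getD_set_eq_if _ j _ 0 b (by rw [hrl]; omega)]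
        by_cases hbj : b = j
        · subst hbj; rw [if_pos rfl, if_pos ⟨rfl, rfl⟩]
        · rw [if_neg hbj, if_neg (fun h => hbj h.2)]
      · rw [if_neg hai, if_neg (fun h => hai h.1)]
    rw [hdpa]
    by_cases hcell : a = i ∧ b = j
    · rw [if_pos hcell]
      obtain ⟨rfl, rfl⟩ := hcell
      have hc2 : a ≤ b ∧ (b - a < k ∨ (b - a = k ∧ b < b + 1)) := ⟨by omega, Or.inr (by omega)⟩
      rw [if_pos hc2]
    · rw [if_neg hcell, h3 a b han hbn]
      by_cases hc : a ≤ b ∧ (b - a < k ∨ (b - a = k ∧ b < j))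
      · rw [if_pos hc, if_pos ⟨hc.1, by omega⟩]
      · rw [if_neg hc, if_neg (by
          rintro ⟨hab, hd | ⟨hd, hb2⟩⟩
          · exact hc ⟨hab, Or.inl hd⟩
          · by_cases hbj : b = j
            · exact hcell ⟨by omega, hbj⟩
            · exact hc ⟨hab, Or.inr ⟨hd, by omega⟩⟩)]

lemma innerA_spec (nums : List Int) (i j k : ℕ) (dp : List (List Int))
    (hij : j = i + k) (hjn : j ≤ nums.length)
    (G : GoodA nums nums.length k j dp) :
    GoodA nums nums.length k nums.length
      (pvInnerA nums (nums.length : Int) ↑i ↑j dp) := by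
  rw [pvInnerA]
  split
  · rename_i hlt
    have hjn' : j < nums.length := by exact_mod_cast hlt
    have e2 : pvGetA dp (↑i + 2) ↑j = fSpec nums (↑i + 2) ↑j :=
      getA_done G _ _ (by omega) (by exact_mod_cast hlt) (by omega)
    have e1 : pvGetA dp (↑i + 1) (↑j - 1) = fSpec nums (↑i + 1) (↑j - 1) :=
      getA_done G _ _ (by omega) (by omega) (by omega)
    have e0 : pvGetA dp ↑i (↑j - 2) = fSpec nums ↑i (↑j - 2) :=
      getA_done G _ _ (by omega) (by omega) (by omega)
    simp only [e2, e1, e0]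
    rw [← fSpec_rec nums (show (i : Int) ≤ ↑j by omega)]
    have G' := GoodA_set G hjn' hij
    have := innerA_spec nums (i + 1) (j + 1) k _ (by omega) (by omega) G'
    push_cast at this ⊢
    exact this
  · rename_i hge
    have : j = nums.length := by
      have : ¬ ((j : Int) < (nums.length : Int)) := hge
      omega
    subst this
    exact G
termination_by nums.length - j
decreasing_by omega

lemma GoodA_zero_col {nums : List Int} {n k col : ℕ} {dp : List (List Int)}
    (hcol : col ≤ k) (G : GoodA nums n k 0 dp) : GoodA nums n k col dp := by
  obtain ⟨h1, h2, h3⟩ := G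
  refine ⟨h1, h2, fun a b ha hb => ?_⟩
  rw [h3 a b ha hb,
      if_congr (show (a ≤ b ∧ (b - a < k ∨ (b - a = k ∧ b < 0))) ↔
        (a ≤ b ∧ (b - a < k ∨ (b - a = k ∧ b < col))) by omega) rfl rfl]

lemma GoodA_succ {nums : List Int} {n k : ℕ} {dp : List (List Int)}
    (G : GoodA nums n k n dp) : GoodA nums n (k + 1) 0 dp := by
  obtain ⟨h1, h2, h3⟩ := G
  refine ⟨h1, h2, fun a b ha hb => ?_⟩
  rw [h3 a b ha hb,
      if_congr (show (a ≤ b ∧ (b - a < k ∨ (b - a = k ∧ b < n))) ↔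
        (a ≤ b ∧ (b - a < k + 1 ∨ (b - a = k + 1 ∧ b < 0))) by omega) rfl rfl]

lemma foldA_spec (nums : List Int) (k : ℕ) (dp : List (List Int))
    (hk : k ≤ nums.length) (G : GoodA nums nums.length k 0 dp) :
    GoodA nums nums.length nums.length 0
      ((PySem.List.pyRange ↑k (nums.length : Int) 1).foldl
        (fun dp k' => pvInnerA nums (nums.length : Int) 0 k' dp) dp) := by
  rcases eq_or_lt_of_le hk with heq | hlt
  · subst heq
    rw [PySem.List.pyRange_one_eq_nil (by omega), List.foldl_nil]
    exact G
  · rw [PySem.List.pyRange_one_cons (by exact_mod_cast hlt), List.foldl_cons]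
    have step := innerA_spec nums 0 k k dp (by omega) (by omega) (GoodA_zero_col (le_refl k) G)
    have := foldA_spec nums (k + 1) _ (by omega) (GoodA_succ step)
    push_cast at this ⊢
    exact this
termination_by nums.length - k
decreasing_by omega

lemma a_eq_fSpec (nums : List Int) (h : nums ≠ []) :
    findMaxCoins nums = fSpec nums 0 ((nums.length : Int) - 1) := by
  have hn : 1 ≤ nums.length := List.length_pos_of_ne_nil h
  unfold findMaxCoins
  by_cases h2 : (nums.length : Int) ≤ 2
  · rw [if_pos h2]; exact max?_eq_fSpec nums h h2
  · rw [if_neg h2]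
    simp only [Int.toNat_natCast]
    have G0 : GoodA nums nums.length 0 0
        (List.replicate nums.length (List.replicate nums.length 0)) := by
      refine ⟨by simp, fun r hr => by simp [List.eq_of_mem_replicate hr], fun a b ha hb => ?_⟩
      unfold dpAt
      rw [List.getD_replicate _ ha, List.getD_replicate _ hb, if_neg (by omega)]
    have Gfin := foldA_spec nums 0 (List.replicate nums.length (List.replicate nums.length 0))
      (by omega) G0
    push_cast at Gfin
    set dpf := (PySem.List.pyRange 0 (nums.length : Int) 1).foldl
      (fun dp k' => pvInnerA nums (nums.length : Int) 0 k' dp)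
      (List.replicate nums.length (List.replicate nums.length 0)) with hdpf
    have hl : nums.length - 1 < nums.length := by omega
    have h01 := pvGet2_nat dpf 0 (nums.length - 1)
      (by rw [Gfin.1]; omega) (by rw [rowlen_of_GoodA Gfin (show (0:ℕ) < nums.length by omega)]; omega)
    push_cast [Nat.cast_sub hn] at h01
    rw [h01, Gfin.2.2 0 (nums.length - 1) (by omega) hl,
        if_pos ⟨by omega, Or.inl (by omega)⟩]
    push_cast [Nat.cast_sub hn]
    rfl

theorem findMaxCoins_spec : Claim_equal_findMaxCoins := by
  intro nums _ hpre
  unfold Spec_findMaxCoins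
  rw [a_eq_fSpec nums hpre, alt_eq_fSpec nums hpre]
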